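-- pv_equiv track=rewrite | github.com/Matenant/Projet-Python | morpion.py | difficulte
-- ===== SOURCE A (Python) =====
-- def conditionsDifficulte(table,i):  #retourne l'état des choix de difficultée
--     if table[5] == 1:   #si veux commencer en premier
--         if table[7] == 1:   #et que on clique sur "jouer"
--             if table[6] == 1:   #mais que "2 joueurs" est coché
--                 return 0, False, False, False   #ne commence pas le jeu
--             else:               #si "2 joueurs" pas coché
--                 return i, True, False, True     #commence le jeu avec la difficultée voulue, et le paramètre commencer
--         else:               #mais si pas de clique sur "jouer"
--             return 0, False, False, False   #sort de la fonction mais reste dans la boucle infinie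
--     else:               #si ne veux pas commencer
--         if table[7] == 1:   #et que on clique sur "jouer"
--             if table[6] == 1:   #mais que "2 joueurs" est coché
--                 return 0, False, False, False   #ne commence pas le jeu
--             else:               #si "2 joueurs" pas coché
--                 return i, False, False, True    #commence le jeu avec la difficultée voulue, sans le paramètre commencer
--         else:               #mais si pas de clique sur "jouer"
--             return 0, False, False, False    #sort de la fonction mais reste dans la boucle infinie
--
-- def difficulte(table):  #élimine les choix de difficultée multiples
--     i = 0   #tableau commence à 0
--     tmp = -1    #il faux que ce soit différent de [0,5[
--     while i != 4:    #parcours les 5 premiers éléments (difficultées)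
--         if table[i] == 1:   #quand rencontre un 1
--             tmp = i         #sauvegarde l'index de la cellule
--         if tmp != -1 and table[i+1] == 1:   #puis si tmp a été modifié et que 2 difficultées ont été cochées
--             return 0, False, False, False   #sort de la fonction, mais reste dans la boucle infinie
--         i = i +1
--
--     if table[0] == 1:   #Impossible
--         return conditionsDifficulte(table,1)
--     elif table[1] == 1: #Difficile
--         return conditionsDifficulte(table,2)
--     elif table[2] == 1: #Moyen
--         return conditionsDifficulte(table,3)
--     elif table[3] == 1: #Facile
--         return conditionsDifficulte(table,4)
--     elif table[4] == 1: #Random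
--         return conditionsDifficulte(table,5)
--     elif table[6] == 1: #2 joueur mais aucun autre mode de difficultée
--         if table[7] == 1:   #si clique sur "jouer"
--             if table[5] == 1:   #et veux commencer
--                 return 0, False, False, False   #sort de la fonction, mais reste dans la boucle infinis
--                                                 #pas besoin de dire qui commence, les joueurs doivent se mettre d'accord
--             else:               #si veux pas commencer
--                 return 0, False, True, True     #commence le jeu entre les deux joueurs
--     return 0, False, False, False   #si rien n'est coché, sort de la fonction, mais reste dans la boucle infinie
-- ===== SOURCE B (Python) =====
-- def difficulte(table):
--     mask = 0
--     for k in range(5):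
--         mask |= (table[k] == 1) << k
--     if mask & (mask - 1):
--         return 0, False, False, False
--     if mask:
--         if table[7] == 1 and table[6] != 1:
--             return mask.bit_length(), table[5] == 1, False, True
--         return 0, False, False, False
--     if table[6] == 1 and table[7] == 1 and table[5] != 1:
--         return 0, False, True, True
--     return 0, False, False, False
-- ===== Notes on version B (the rewrite author's own statement) =====
-- stated objective: alternative
-- what changed: Encodes the five difficulty flags as a bitmask in one arithmetic pass, detects multiple selections with the bit trick mask&(mask-1), and recovers the 1-based difficulty index as mask.bit_length(), replacing A's stateful tmp-index scan and its five-way elif chain into conditionsDifficulte with three direct decisions on the control flags.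
-- outside the precondition, e.g. on difficulte([1, 1]): A returns (0, False, False, False), B raises IndexError
import Mathlib
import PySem

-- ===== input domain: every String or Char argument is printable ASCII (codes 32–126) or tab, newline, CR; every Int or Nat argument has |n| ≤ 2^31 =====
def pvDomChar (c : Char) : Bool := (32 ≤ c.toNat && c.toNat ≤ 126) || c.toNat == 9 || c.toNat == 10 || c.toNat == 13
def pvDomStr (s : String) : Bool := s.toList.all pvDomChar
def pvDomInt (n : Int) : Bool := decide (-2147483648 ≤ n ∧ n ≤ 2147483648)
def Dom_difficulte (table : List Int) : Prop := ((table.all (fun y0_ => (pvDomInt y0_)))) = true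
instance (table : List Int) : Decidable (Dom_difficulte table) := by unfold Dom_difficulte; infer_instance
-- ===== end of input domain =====

-- B encodes the five difficulty flags as a bitmask built in one pass, detects multiple
-- selections with mask&(mask-1) and recovers the 1-based index with bit_length, replacing
-- A's stateful tmp-index scan and elif chain (objective: alternative).


-- ===== PORT A =====
def conditionsDifficulte (table : List Int) (i : Int) : Int × Bool × Bool × Bool :=
  if PySem.List.pyGetD table 5 0 == 1 then
    if PySem.List.pyGetD table 7 0 == 1 then
      if PySem.List.pyGetD table 6 0 == 1 then (0, false, false, false)
      else (i, true, false, true)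
    else (0, false, false, false)
  else
    if PySem.List.pyGetD table 7 0 == 1 then
      if PySem.List.pyGetD table 6 0 == 1 then (0, false, false, false)
      else (i, false, false, true)
    else (0, false, false, false)

-- the while loop 'while i != 4' runs exactly 4 iterations from i = 0; the Nat argument is that
-- remaining-iteration count, i and tmp are the loop variables; returns true iff the loop hits
-- the early 'return 0, False, False, False'
def difficulteLoop (table : List Int) (i : Int) (tmp : Int) : Nat → Bool
  | 0 => false
  | fuel+1 =>
    let tmp' := if PySem.List.pyGetD table i 0 == 1 then i else tmp
    if tmp' != -1 && PySem.List.pyGetD table (i + 1) 0 == 1 then true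
    else difficulteLoop table (i + 1) tmp' fuel

def difficulte (table : List Int) : Int × Bool × Bool × Bool :=
  if difficulteLoop table 0 (-1) 4 then (0, false, false, false)
  else if PySem.List.pyGetD table 0 0 == 1 then conditionsDifficulte table 1
  else if PySem.List.pyGetD table 1 0 == 1 then conditionsDifficulte table 2
  else if PySem.List.pyGetD table 2 0 == 1 then conditionsDifficulte table 3
  else if PySem.List.pyGetD table 3 0 == 1 then conditionsDifficulte table 4
  else if PySem.List.pyGetD table 4 0 == 1 then conditionsDifficulte table 5
  else if PySem.List.pyGetD table 6 0 == 1 then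
    if PySem.List.pyGetD table 7 0 == 1 then
      if PySem.List.pyGetD table 5 0 == 1 then (0, false, false, false)
      else (0, false, true, true)
    else (0, false, false, false)
  else (0, false, false, false)

-- ===== PORT B =====
-- Python's mask.bit_length() on the positive mask of this branch equals Nat.log2 mask + 1
-- (exact for mask > 0, the only place Source B calls it).
def difficulte_alt (table : List Int) : Int × Bool × Bool × Bool :=
  let mask : Nat := (List.range 5).foldl
    (fun (m k : Nat) =>
      m ||| ((if PySem.List.pyGetD table (k : Int) 0 == 1 then (1 : Nat) else 0) <<< k)) 0
  if mask &&& (mask - 1) ≠ 0 then (0, false, false, false)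
  else if mask ≠ 0 then
    if PySem.List.pyGetD table 7 0 == 1 && !(PySem.List.pyGetD table 6 0 == 1) then
      ((Nat.log2 mask + 1 : Nat), PySem.List.pyGetD table 5 0 == 1, false, true)
    else (0, false, false, false)
  else if PySem.List.pyGetD table 6 0 == 1 && PySem.List.pyGetD table 7 0 == 1
      && !(PySem.List.pyGetD table 5 0 == 1) then (0, false, true, true)
  else (0, false, false, false)

-- ===== PRECONDITION & SPEC =====
-- Pre_ excludes the tables on which A raises IndexError reading past the end, plus the
-- tables of length < 8 on which A's partial access order happens to return the failure tuple
-- before its first out-of-range read (an accident of which cells each branch touches) while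
-- B's full bitmask/flag reads raise IndexError there.
def Pre_difficulte (table : List Int) : Prop :=
  8 ≤ table.length ∨
  (5 ≤ table.length ∧ 2 ≤ (table.take 5).count 1) ∨
  (table.length = 7 ∧ (table.take 5).count 1 = 0 ∧ table.getD 6 0 ≠ 1)
instance (table : List Int) : Decidable (Pre_difficulte table) := by unfold Pre_difficulte; infer_instance
def pvWitness_difficulte : List Int := [1, 0, 0, 0, 0, 1, 0, 1]
def Spec_difficulte (table : List Int) (out : Int × Bool × Bool × Bool) : Prop := out = difficulte_alt table
instance (table : List Int) (out : Int × Bool × Bool × Bool) : Decidable (Spec_difficulte table out) := by unfold Spec_difficulte; infer_instance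

-- ===== CLAIM (what is proved, stated in full; the proofs are below) =====
def Claim_equal_difficulte : Prop := ∀ (table : List Int), Dom_difficulte table → Pre_difficulte table → Spec_difficulte table (difficulte table)

-- ===== LEMMAS AND PROOFS =====

lemma gets8 (a b c d e f g h : Int) (r : List Int) :
    PySem.List.pyGetD (a::b::c::d::e::f::g::h::r) (0:Int) 0 = a ∧
    PySem.List.pyGetD (a::b::c::d::e::f::g::h::r) (1:Int) 0 = b ∧
    PySem.List.pyGetD (a::b::c::d::e::f::g::h::r) (2:Int) 0 = c ∧
    PySem.List.pyGetD (a::b::c::d::e::f::g::h::r) (3:Int) 0 = d ∧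
    PySem.List.pyGetD (a::b::c::d::e::f::g::h::r) (4:Int) 0 = e ∧
    PySem.List.pyGetD (a::b::c::d::e::f::g::h::r) (5:Int) 0 = f ∧
    PySem.List.pyGetD (a::b::c::d::e::f::g::h::r) (6:Int) 0 = g ∧
    PySem.List.pyGetD (a::b::c::d::e::f::g::h::r) (7:Int) 0 = h := by
  refine ⟨?_,?_,?_,?_,?_,?_,?_,?_⟩ <;> simp [pysem]

lemma gets5 (a b c d e : Int) (r : List Int) :
    PySem.List.pyGetD (a::b::c::d::e::r) (0:Int) 0 = a ∧
    PySem.List.pyGetD (a::b::c::d::e::r) (1:Int) 0 = b ∧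
    PySem.List.pyGetD (a::b::c::d::e::r) (2:Int) 0 = c ∧
    PySem.List.pyGetD (a::b::c::d::e::r) (3:Int) 0 = d ∧
    PySem.List.pyGetD (a::b::c::d::e::r) (4:Int) 0 = e := by
  refine ⟨?_,?_,?_,?_,?_⟩ <;> simp [pysem]

lemma gets7 (a b c d e f g : Int) :
    PySem.List.pyGetD [a,b,c,d,e,f,g] (0:Int) 0 = a ∧
    PySem.List.pyGetD [a,b,c,d,e,f,g] (1:Int) 0 = b ∧
    PySem.List.pyGetD [a,b,c,d,e,f,g] (2:Int) 0 = c ∧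
    PySem.List.pyGetD [a,b,c,d,e,f,g] (3:Int) 0 = d ∧
    PySem.List.pyGetD [a,b,c,d,e,f,g] (4:Int) 0 = e ∧
    PySem.List.pyGetD [a,b,c,d,e,f,g] (5:Int) 0 = f ∧
    PySem.List.pyGetD [a,b,c,d,e,f,g] (6:Int) 0 = g :=
  ⟨rfl, rfl, rfl, rfl, rfl, rfl, rfl⟩

lemma G7seven (a b c d e f g : Int) :
    PySem.List.pyGetD [a,b,c,d,e,f,g] (7:Int) 0 = 0 := rfl

-- ===== VERDICT (by name: the statement is the Claim_ definition above) =====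
set_option maxHeartbeats 1000000 in
theorem difficulte_spec : Claim_equal_difficulte := by
  intro table _ hpre
  unfold Pre_difficulte at hpre
  rcases hpre with h8 | ⟨h5, hcnt⟩ | ⟨h7, hcnt, hg⟩
  · obtain ⟨a, b, c, d, e, f, g, h, rest, rfl⟩ :
        ∃ a b c d e f g h rest, table = a :: b :: c :: d :: e :: f :: g :: h :: rest := by
      match table, h8 with
      | a :: b :: c :: d :: e :: f :: g :: h :: rest, _ =>
        exact ⟨a, b, c, d, e, f, g, h, rest, rfl⟩
    obtain ⟨G0, G1, G2, G3, G4, G5, G6, G7⟩ := gets8 a b c d e f g h rest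
    simp only [Spec_difficulte, difficulte, difficulte_alt, difficulteLoop,
      conditionsDifficulte, List.range_succ, List.range_zero, List.map_cons, List.map_nil,
      List.nil_append, List.cons_append, List.foldl_cons, List.foldl_nil,
      Nat.cast_ofNat, Nat.cast_zero, Nat.cast_one, Int.reduceAdd,
      G0, G1, G2, G3, G4, G5, G6, G7]
    generalize (a == 1) = A
    generalize (b == 1) = B
    generalize (c == 1) = C
    generalize (d == 1) = D
    generalize (e == 1) = E
    generalize (f == 1) = F
    generalize (g == 1) = G
    generalize (h == 1) = H
    revert A B C D E F G H
    clear G0 G1 G2 G3 G4 G5 G6 G7 h8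
    decide
  · obtain ⟨a, b, c, d, e, rest, rfl⟩ :
        ∃ a b c d e rest, table = a :: b :: c :: d :: e :: rest := by
      match table, h5 with
      | a :: b :: c :: d :: e :: rest, _ => exact ⟨a, b, c, d, e, rest, rfl⟩
    obtain ⟨G0, G1, G2, G3, G4⟩ := gets5 a b c d e rest
    simp only [List.take_succ_cons, List.take_zero, List.count_cons, List.count_nil] at hcnt
    simp only [Spec_difficulte, difficulte, difficulte_alt, difficulteLoop,
      conditionsDifficulte, List.range_succ, List.range_zero, List.map_cons, List.map_nil,
      List.nil_append, List.cons_append, List.foldl_cons, List.foldl_nil,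
      Nat.cast_ofNat, Nat.cast_zero, Nat.cast_one, Int.reduceAdd,
      G0, G1, G2, G3, G4]
    revert hcnt
    generalize (a == 1) = A
    generalize (b == 1) = B
    generalize (c == 1) = C
    generalize (d == 1) = D
    generalize (e == 1) = E
    cases A <;> cases B <;> cases C <;> cases D <;> cases E <;> simp
  · obtain ⟨a, b, c, d, e, f, g, rest, rfl⟩ :
        ∃ a b c d e f g rest, table = a :: b :: c :: d :: e :: f :: g :: rest := by
      match table, (by omega : 7 ≤ table.length) with
      | a :: b :: c :: d :: e :: f :: g :: rest, _ =>
        exact ⟨a, b, c, d, e, f, g, rest, rfl⟩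
    obtain rfl : rest = [] := by
      simp only [List.length_cons] at h7
      exact List.eq_nil_of_length_eq_zero (by omega)
    obtain ⟨G0, G1, G2, G3, G4, G5, G6⟩ := gets7 a b c d e f g
    simp only [List.take_succ_cons, List.take_zero, List.count_cons, List.count_nil] at hcnt
    simp only [List.getD_eq_getElem?_getD, List.getElem?_cons_succ, List.getElem?_cons_zero,
      Option.getD_some] at hg
    simp only [Spec_difficulte, difficulte, difficulte_alt, difficulteLoop,
      conditionsDifficulte, List.range_succ, List.range_zero, List.map_cons, List.map_nil,
      List.nil_append, List.cons_append, List.foldl_cons, List.foldl_nil,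
      Nat.cast_ofNat, Nat.cast_zero, Nat.cast_one, Int.reduceAdd,
      G0, G1, G2, G3, G4, G5, G6, G7seven a b c d e f g]
    revert hcnt
    have hg' : (g == 1) = false := by simpa using hg
    rw [hg']
    generalize (a == 1) = A
    generalize (b == 1) = B
    generalize (c == 1) = C
    generalize (d == 1) = D
    generalize (e == 1) = E
    generalize (f == 1) = F
    cases A <;> cases B <;> cases C <;> cases D <;> cases E <;> cases F <;> simp
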